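-- pv_equiv track=rewrite | github.com/djig/udacity | project_3/problem_3.py | rearrange_digits_quick_sort
-- ===== SOURCE A (Python) =====
-- def rearrange_digits_quick_sort(input_list):
--     """
--     Args:
--        input_list(list): Input List
--     Returns:
--        (int),(int): Two maximum sums
--     """
--     if len(input_list) == 0:
--         return [0, 0]
--     def partition(arr, start, end):
--         p_i = end
--         pivot = arr[p_i]
--         j = start
--         for i in range(start, end):
--             if arr[i] > pivot:
--                 arr[i], arr[j] = arr[j], arr[i]
--                 j +=1
--         tmp = arr[j]
--         arr[j] = pivot
--         arr[p_i] = tmp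
--         return j
--
--     def helper(arr, start,end):
--         if start < end:
--             pi = partition(arr, start, end)
--             helper(arr, start, pi-1)
--             helper(arr, pi+1, end)
--
--     helper(input_list, 0 , len(input_list)-1)
--
--     res_1 =[]
--     res_2 = []
--     for i in range(0, len(input_list)):
--         if i % 2 == 0:
--             res_1.append(input_list[i])
--         else:
--             res_2.append(input_list[i])
--     ans_1=0
--     ans_2 =0
--     for i in range(0, len(res_1)):
--         ans_1 += res_1[i]* pow(10,(len(res_1)-i-1))
--     for i in range(0, len(res_2)):
--         ans_2 += res_2[i]* pow(10,(len(res_2)-i-1))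
--     return [ans_1,ans_2]
--
--     pass
-- ===== SOURCE B (Python) =====
-- def rearrange_digits_quick_sort(input_list):
--     """
--     Args:
--        input_list(list): Input List
--     Returns:
--        (int),(int): Two maximum sums
--     """
--     s = sorted(input_list, reverse=True)
--     n = len(s)
--     a = b = 0
--     i = 0
--     while i < n:
--         a = a * 10 + s[i]
--         if i + 1 < n:
--             b = b * 10 + s[i + 1]
--         i += 2
--     return [a, b]
-- ===== Notes on version B (the rewrite author's own statement) =====
-- stated objective: faster
-- what changed: Replaced the hand-written in-place quicksort plus three index loops (parity split into two lists, then positional pow-of-10 sums) by the built-in sort and a single two-at-a-time pass with Horner accumulators.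
import Mathlib
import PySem

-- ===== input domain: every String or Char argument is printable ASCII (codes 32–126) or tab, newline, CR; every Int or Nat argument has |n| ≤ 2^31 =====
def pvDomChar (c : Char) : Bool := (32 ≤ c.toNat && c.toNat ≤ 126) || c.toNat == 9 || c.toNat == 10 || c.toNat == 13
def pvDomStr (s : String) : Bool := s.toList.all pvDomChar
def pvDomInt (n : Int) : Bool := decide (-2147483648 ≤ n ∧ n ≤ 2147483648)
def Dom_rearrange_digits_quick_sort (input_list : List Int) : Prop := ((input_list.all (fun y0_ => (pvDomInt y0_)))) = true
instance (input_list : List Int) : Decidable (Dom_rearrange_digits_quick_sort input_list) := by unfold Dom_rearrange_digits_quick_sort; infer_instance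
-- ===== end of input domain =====

-- B replaces A's hand-written in-place quicksort + three index loops by the library sort and one
-- two-at-a-time Horner pass (objective: faster).  A sorts its argument in place (observable by the
-- caller); B does not mutate its argument — the equivalence proved here is about the RETURN value.

-- B replaces A's hand-written in-place quicksort plus three index loops by the library sort and one
-- two-at-a-time Horner pass (objective: faster).  Python A sorts its list argument IN PLACE
-- (observable by the caller); B does not mutate it — the equivalence proved is about the RETURN value.

-- ===== PORT A =====
-- All Python indices involved are nonnegative and in range, so Nat indices with List.set / List.getD
-- are exact here.  The 'arr[i], arr[j] = arr[j], arr[i]' swap reads both old values before writing.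
def pvPartLoopBody (pivot : Int) (st : List Int × Nat) (i : Nat) : List Int × Nat :=
  if st.1.getD i 0 > pivot then
    (((st.1.set i (st.1.getD st.2 0)).set st.2 (st.1.getD i 0)), st.2 + 1)
  else st

-- partition(arr, start, end): the for-loop is a fold over range(start, end)
def pvPartition (arr : List Int) (s e : Nat) : List Int × Nat :=
  let pivot := arr.getD e 0
  let aj := (List.range' s (e - s)).foldl (pvPartLoopBody pivot) (arr, s)
  let tmp := aj.1.getD aj.2 0
  let a1 := aj.1.set aj.2 pivot
  let a2 := a1.set e tmp
  (a2, aj.2)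

-- helper(arr, start, end): Python's recursion, with fuel; the initial fuel len(input_list) always
-- suffices (each recursive call works on a strictly shorter segment, see pvQsort_spec below)
def pvQsortHelper : Nat → List Int → Nat → Nat → List Int
  | 0, arr, _, _ => arr
  | fuel + 1, arr, s, e =>
    if s < e then
      let ap := pvPartition arr s e
      let a2 := pvQsortHelper fuel ap.1 s (ap.2 - 1)
      pvQsortHelper fuel a2 (ap.2 + 1) e
    else arr

def rearrange_digits_quick_sort (input_list : List Int) : List Int :=
  if input_list.length = 0 then [0, 0] else
  let srt := pvQsortHelper input_list.length input_list 0 (input_list.length - 1)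
  let rr := (List.range srt.length).foldl
    (fun (r : List Int × List Int) i =>
      if i % 2 = 0 then (r.1 ++ [srt.getD i 0], r.2) else (r.1, r.2 ++ [srt.getD i 0]))
    ([], [])
  let ans1 := (List.range rr.1.length).foldl
    (fun a i => a + rr.1.getD i 0 * 10 ^ (rr.1.length - i - 1)) 0
  let ans2 := (List.range rr.2.length).foldl
    (fun a i => a + rr.2.getD i 0 * 10 ^ (rr.2.length - i - 1)) 0
  [ans1, ans2]

-- ===== PORT B =====
-- the while-loop of Source B walks the sorted list two elements at a time
def pvPairGo : List Int → Int → Int → Int × Int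
  | [], a, b => (a, b)
  | [x], a, b => (a * 10 + x, b)
  | x :: y :: xs, a, b => pvPairGo xs (a * 10 + x) (b * 10 + y)

def rearrange_digits_quick_sort_alt (input_list : List Int) : List Int :=
  let s := PySem.List.sorted input_list (fun x => x) true
  let ab := pvPairGo s 0 0
  [ab.1, ab.2]

-- ===== PRECONDITION & SPEC =====
def Spec_rearrange_digits_quick_sort (input_list : List Int) (out : List Int) : Prop := out = rearrange_digits_quick_sort_alt input_list
instance (input_list : List Int) (out : List Int) : Decidable (Spec_rearrange_digits_quick_sort input_list out) := by unfold Spec_rearrange_digits_quick_sort; infer_instance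

-- ===== CLAIM (what is proved, stated in full; the proofs are below) =====
def Claim_equal_rearrange_digits_quick_sort : Prop := ∀ (input_list : List Int), Dom_rearrange_digits_quick_sort input_list → Spec_rearrange_digits_quick_sort input_list (rearrange_digits_quick_sort input_list)

-- ===== LEMMAS AND PROOFS =====

def pvEvens : List Int → List Int
  | [] => []
  | [x] => [x]
  | x :: _ :: xs => x :: pvEvens xs

def pvOdds : List Int → List Int
  | [] => []
  | [_] => []
  | _ :: y :: xs => y :: pvOdds xs

def pvHorner (l : List Int) (a : Int) : Int := l.foldl (fun a d => a * 10 + d) a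

theorem pvHorner_acc (l : List Int) : ∀ a : Int, pvHorner l a = a * 10 ^ l.length + pvHorner l 0 := by
  induction l with
  | nil => simp [pvHorner]
  | cons x t ih =>
    intro a
    show pvHorner t (a * 10 + x) = a * 10 ^ (t.length + 1) + pvHorner t (0 * 10 + x)
    rw [ih (a * 10 + x), ih (0 * 10 + x)]
    ring

theorem pvPairGo_eq (s : List Int) : ∀ a b,
    pvPairGo s a b = (pvHorner (pvEvens s) a, pvHorner (pvOdds s) b) := by
  induction s using pvEvens.induct with
  | case1 => intro a b; simp [pvPairGo, pvEvens, pvOdds, pvHorner]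
  | case2 x => intro a b; simp [pvPairGo, pvEvens, pvOdds, pvHorner]
  | case3 x y xs ih =>
    intro a b
    show pvPairGo xs (a * 10 + x) (b * 10 + y) = _
    rw [ih]
    simp [pvEvens, pvOdds, pvHorner]

theorem pvPowShift (x : Int) (t : List Int) : ∀ (m k : Nat) (c : Int),
    (List.range' (k + 1) m).foldl (fun a i => a + (x :: t).getD i 0 * 10 ^ ((x :: t).length - i - 1)) c
      = (List.range' k m).foldl (fun a i => a + t.getD i 0 * 10 ^ (t.length - i - 1)) c := by
  intro m
  induction m with
  | zero => intro k c; simp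
  | succ m ih =>
    intro k c
    rw [List.range'_succ, List.range'_succ, List.foldl_cons, List.foldl_cons]
    have h1 : (x :: t).getD (k + 1) 0 = t.getD k 0 := by simp [List.getD]
    have h2 : (x :: t).length - (k + 1) - 1 = t.length - k - 1 := by simp
    rw [h1, h2]
    exact ih (k + 1) _

theorem pvFoldAdd (g : Nat → Int) : ∀ (L : List Nat) (c : Int),
    L.foldl (fun a i => a + g i) c = c + L.foldl (fun a i => a + g i) 0 := by
  intro L
  induction L with
  | nil => simp
  | cons h t ih => intro c; rw [List.foldl_cons, List.foldl_cons, ih (c + g h), ih (0 + g h)]; ring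

theorem pvPowLoop_eq (r : List Int) :
    (List.range r.length).foldl (fun a i => a + r.getD i 0 * 10 ^ (r.length - i - 1)) 0
      = pvHorner r 0 := by
  induction r with
  | nil => simp [pvHorner]
  | cons x t ih =>
    rw [List.range_eq_range'] at *
    show (List.range' 0 (t.length + 1)).foldl _ _ = _
    rw [List.range'_succ, List.foldl_cons, pvPowShift]
    rw [pvFoldAdd _ _ (0 + (x :: t).getD 0 0 * 10 ^ ((x :: t).length - 0 - 1)), ih]
    have : pvHorner (x :: t) 0 = pvHorner t (0 * 10 + x) := rfl
    rw [this, pvHorner_acc t (0 * 10 + x)]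
    simp [List.getD]

theorem pvSplitShift (x y : Int) (t : List Int) : ∀ (m k : Nat) (acc : List Int × List Int),
    (List.range' (k + 2) m).foldl
      (fun (r : List Int × List Int) i =>
        if i % 2 = 0 then (r.1 ++ [(x :: y :: t).getD i 0], r.2) else (r.1, r.2 ++ [(x :: y :: t).getD i 0])) acc
      = (List.range' k m).foldl
      (fun (r : List Int × List Int) i =>
        if i % 2 = 0 then (r.1 ++ [t.getD i 0], r.2) else (r.1, r.2 ++ [t.getD i 0])) acc := by
  intro m
  induction m with
  | zero => intro k acc; simp
  | succ m ih =>
    intro k acc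
    rw [List.range'_succ, List.range'_succ, List.foldl_cons, List.foldl_cons]
    have h1 : (x :: y :: t).getD (k + 2) 0 = t.getD k 0 := by simp [List.getD]
    have h2 : ((k + 2) % 2 = 0) = (k % 2 = 0) := by
      simp only [eq_iff_iff]; omega
    rw [h1]
    simp only [h2]
    exact ih (k + 1) _

theorem pvSplitMain (s : List Int) : ∀ (r1 r2 : List Int),
    (List.range' 0 s.length).foldl
      (fun (r : List Int × List Int) i =>
        if i % 2 = 0 then (r.1 ++ [s.getD i 0], r.2) else (r.1, r.2 ++ [s.getD i 0]))
      (r1, r2) = (r1 ++ pvEvens s, r2 ++ pvOdds s) := by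
  induction s using pvEvens.induct with
  | case1 => intro r1 r2; simp [pvEvens, pvOdds]
  | case2 x => intro r1 r2; simp [pvEvens, pvOdds, List.getD]
  | case3 x y t ih =>
    intro r1 r2
    show (List.range' 0 (t.length + 1 + 1)).foldl _ _ = _
    rw [List.range'_succ, List.foldl_cons, List.range'_succ, List.foldl_cons]
    refine Eq.trans (pvSplitShift x y t t.length 0 _)
      (Eq.trans (ih (r1 ++ [x]) (r2 ++ [y])) ?_)
    simp [pvEvens, pvOdds]

theorem pvSplitLoop_eq (s : List Int) :
    (List.range s.length).foldl
      (fun (r : List Int × List Int) i =>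
        if i % 2 = 0 then (r.1 ++ [s.getD i 0], r.2) else (r.1, r.2 ++ [s.getD i 0]))
      ([], []) = (pvEvens s, pvOdds s) := by
  rw [List.range_eq_range']
  simpa using pvSplitMain s [] []

theorem pvGetD_mid (P Q : List Int) (v : Int) (n : Nat) (h : n = P.length) :
    (P ++ v :: Q).getD n 0 = v := by
  subst h
  rw [List.getD_append_right _ _ _ _ (le_refl _)]
  simp

theorem pvSet_mid (P Q : List Int) (v w : Int) (n : Nat) (h : n = P.length) :
    (P ++ v :: Q).set n w = P ++ w :: Q := by
  subst h
  rw [List.set_append_right _ _ (le_refl _)]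
  simp

theorem pvPartLoop_inv (piv : Int) (pre post : List Int) :
    ∀ (U G B : List Int), (∀ x ∈ G, x > piv) → (∀ x ∈ B, ¬ x > piv) →
    ∃ G' B', (∀ x ∈ G', x > piv) ∧ (∀ x ∈ B', ¬ x > piv) ∧
      (G' ++ B').Perm (G ++ B ++ U) ∧
      (List.range' (pre.length + G.length + B.length) U.length).foldl (pvPartLoopBody piv)
        (pre ++ G ++ B ++ U ++ [piv] ++ post, pre.length + G.length) =
      (pre ++ G' ++ B' ++ [piv] ++ post, pre.length + G'.length) := by
  intro U
  induction U with
  | nil =>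
    intro G B hG hB
    exact ⟨G, B, hG, hB, by simp, by simp⟩
  | cons u U' ih =>
    intro G B hG hB
    simp only [List.length_cons]
    rw [List.range'_succ, List.foldl_cons]
    have hgi : (pre ++ G ++ B ++ (u :: U') ++ [piv] ++ post).getD
        (pre.length + G.length + B.length) 0 = u := by
      rw [show pre ++ G ++ B ++ (u :: U') ++ [piv] ++ post
          = (pre ++ G ++ B) ++ u :: (U' ++ [piv] ++ post) by simp]
      exact pvGetD_mid _ _ _ _ (by simp <;> omega)
    by_cases hu : u > piv
    · cases B with
      | nil =>
        have hgj : (pre ++ G ++ [] ++ (u :: U') ++ [piv] ++ post).getD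
            (pre.length + G.length) 0 = u := by
          rw [show pre ++ G ++ [] ++ (u :: U') ++ [piv] ++ post
              = (pre ++ G) ++ u :: (U' ++ [piv] ++ post) by simp]
          exact pvGetD_mid _ _ _ _ (by simp)
        have hstep : pvPartLoopBody piv
            (pre ++ G ++ [] ++ (u :: U') ++ [piv] ++ post, pre.length + G.length)
            (pre.length + G.length + ([] : List Int).length)
            = (pre ++ (G ++ [u]) ++ [] ++ U' ++ [piv] ++ post, pre.length + G.length + 1) := by
          unfold pvPartLoopBody
          simp only [List.length_nil, Nat.add_zero] at *
          rw [if_pos (by rw [hgi]; exact hu)]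
          rw [hgi]
          rw [show pre ++ G ++ [] ++ (u :: U') ++ [piv] ++ post
              = (pre ++ G) ++ u :: (U' ++ [piv] ++ post) by simp]
          rw [pvSet_mid _ _ _ _ _ (by simp), pvSet_mid _ _ _ _ _ (by simp)]
          simp
        rw [show pre.length + G.length + ([] : List Int).length = pre.length + G.length by simp] at hstep ⊢
        rw [hstep]
        obtain ⟨G2, B2, h1, h2, h3, h4⟩ := ih (G ++ [u]) []
          (by intro x hx; simp at hx; rcases hx with h | h
              · exact hG x h
              · rw [h]; exact hu)
          (by intro x hx; simp at hx)
        refine ⟨G2, B2, h1, h2, ?_, ?_⟩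
        · refine h3.trans ?_
          rw [← Multiset.coe_eq_coe]
          simp only [← Multiset.coe_add, ← Multiset.cons_coe]
          simp only [← Multiset.singleton_add]
          abel
        · simp only [List.length_nil, Nat.add_zero] at h4
          rw [show pre.length + G.length + 1 = pre.length + (G ++ [u]).length by simp <;> omega]
          exact h4
      | cons b B' =>
        have hgj : (pre ++ G ++ (b :: B') ++ (u :: U') ++ [piv] ++ post).getD
            (pre.length + G.length) 0 = b := by
          rw [show pre ++ G ++ (b :: B') ++ (u :: U') ++ [piv] ++ post
              = (pre ++ G) ++ b :: (B' ++ (u :: U') ++ [piv] ++ post) by simp]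
          exact pvGetD_mid _ _ _ _ (by simp)
        have hset : ((pre ++ G ++ (b :: B') ++ (u :: U') ++ [piv] ++ post).set
              (pre.length + G.length + (b :: B').length) b).set (pre.length + G.length) u
            = pre ++ (G ++ [u]) ++ (B' ++ [b]) ++ U' ++ [piv] ++ post := by
          rw [show pre ++ G ++ (b :: B') ++ (u :: U') ++ [piv] ++ post
              = (pre ++ G ++ (b :: B')) ++ u :: (U' ++ [piv] ++ post) by simp]
          rw [pvSet_mid _ _ _ _ _ (by simp <;> omega)]
          rw [show (pre ++ G ++ (b :: B')) ++ b :: (U' ++ [piv] ++ post)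
              = (pre ++ G) ++ b :: (B' ++ b :: (U' ++ [piv] ++ post)) by simp]
          rw [pvSet_mid _ _ _ _ _ (by simp)]
          simp
        have hstep : pvPartLoopBody piv
            (pre ++ G ++ (b :: B') ++ (u :: U') ++ [piv] ++ post, pre.length + G.length)
            (pre.length + G.length + (b :: B').length)
            = (pre ++ (G ++ [u]) ++ (B' ++ [b]) ++ U' ++ [piv] ++ post,
               pre.length + G.length + 1) := by
          unfold pvPartLoopBody
          rw [if_pos (by rw [hgi]; exact hu)]
          rw [hgi, hgj, hset]
        rw [hstep]
        obtain ⟨G2, B2, h1, h2, h3, h4⟩ := ih (G ++ [u]) (B' ++ [b])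
          (by intro x hx; simp at hx; rcases hx with h | h
              · exact hG x h
              · rw [h]; exact hu)
          (by intro x hx; simp at hx; rcases hx with h | h <;> exact hB x (by simp [h]))
        refine ⟨G2, B2, h1, h2, ?_, ?_⟩
        · refine h3.trans ?_
          rw [← Multiset.coe_eq_coe]
          simp only [← Multiset.coe_add, ← Multiset.cons_coe]
          simp only [← Multiset.singleton_add]
          abel
        · rw [show pre.length + G.length + (b :: B').length + 1
              = pre.length + (G ++ [u]).length + (B' ++ [b]).length by simp <;> omega]
          rw [show pre.length + G.length + 1 = pre.length + (G ++ [u]).length by simp <;> omega]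
          exact h4
    · have hstep : pvPartLoopBody piv
          (pre ++ G ++ B ++ (u :: U') ++ [piv] ++ post, pre.length + G.length)
          (pre.length + G.length + B.length)
          = (pre ++ G ++ (B ++ [u]) ++ U' ++ [piv] ++ post, pre.length + G.length) := by
        unfold pvPartLoopBody
        rw [if_neg (by rw [hgi]; exact hu)]
        congr 1
        simp
      rw [hstep]
      obtain ⟨G2, B2, h1, h2, h3, h4⟩ := ih G (B ++ [u]) hG
        (by intro x hx; simp at hx; rcases hx with h | h
            · exact hB x h
            · rw [h]; exact hu)
      refine ⟨G2, B2, h1, h2, ?_, ?_⟩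
      · refine h3.trans ?_
        rw [← Multiset.coe_eq_coe]
        simp only [← Multiset.coe_add, ← Multiset.cons_coe]
        simp only [← Multiset.singleton_add]
        abel
      · rw [show pre.length + G.length + B.length + 1
            = pre.length + G.length + (B ++ [u]).length by simp <;> omega]
        exact h4

theorem pvPermAux (l1 l2 : List Int) (h : (l1 : Multiset Int) = (l2 : Multiset Int)) :
    l1.Perm l2 := Multiset.coe_eq_coe.mp h

theorem pvPartition_spec (pre U post : List Int) (piv : Int) :
    ∃ L R, (∀ x ∈ L, x > piv) ∧ (∀ x ∈ R, ¬ x > piv) ∧ (L ++ R).Perm U ∧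
      pvPartition (pre ++ (U ++ [piv]) ++ post) pre.length (pre.length + U.length) =
        (pre ++ (L ++ [piv] ++ R) ++ post, pre.length + L.length) := by
  obtain ⟨G', B', h1, h2, h3, h4⟩ := pvPartLoop_inv piv pre post U [] []
    (by intro x hx; simp at hx) (by intro x hx; simp at hx)
  simp only [List.append_nil, List.length_nil, Nat.add_zero] at h3 h4
  have hpiv : (pre ++ (U ++ [piv]) ++ post).getD (pre.length + U.length) 0 = piv := by
    rw [show pre ++ (U ++ [piv]) ++ post = (pre ++ U) ++ piv :: post by simp]
    exact pvGetD_mid _ _ _ _ (by simp)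
  have hlen : G'.length + B'.length = U.length := by
    have := h3.length_eq; simpa using this
  unfold pvPartition
  simp only [hpiv]
  rw [show pre.length + U.length - pre.length = U.length from by omega]
  rw [show pre ++ (U ++ [piv]) ++ post = pre ++ U ++ [piv] ++ post from by simp, h4]
  cases B' with
  | nil =>
    simp only [List.length_nil, Nat.add_zero] at hlen
    refine ⟨G', [], h1, by simp, by simpa using h3, ?_⟩
    rw [show pre ++ G' ++ [] ++ [piv] ++ post = (pre ++ G') ++ piv :: post from by simp]
    rw [pvGetD_mid _ _ _ _ (by simp)]
    rw [pvSet_mid _ _ _ _ _ (by simp)]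
    rw [pvSet_mid _ _ _ _ _ (by simp [← hlen])]
    simp
  | cons b B'' =>
    simp only [List.length_cons] at hlen
    refine ⟨G', B'' ++ [b], h1, ?_, ?_, ?_⟩
    · intro x hx; simp at hx; rcases hx with h | h <;> exact h2 x (by simp [h])
    · refine (pvPermAux _ _ ?_).trans h3
      simp only [← Multiset.coe_add, ← Multiset.cons_coe]
      simp only [← Multiset.singleton_add]
      abel
    · rw [show pre ++ G' ++ (b :: B'') ++ [piv] ++ post
          = (pre ++ G') ++ b :: (B'' ++ [piv] ++ post) from by simp]
      rw [pvGetD_mid _ _ _ _ (by simp)]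
      rw [pvSet_mid _ _ _ _ _ (by simp)]
      rw [show (pre ++ G') ++ piv :: (B'' ++ [piv] ++ post)
          = (pre ++ G' ++ piv :: B'') ++ piv :: post from by simp]
      rw [pvSet_mid _ _ _ _ _ (by simp [← hlen])]
      simp

theorem pvQsort_spec : ∀ (fuel : Nat) (seg pre post : List Int), seg.length ≤ fuel →
    ∃ seg', seg'.Perm seg ∧ seg'.Pairwise (· ≥ ·) ∧
      pvQsortHelper fuel (pre ++ seg ++ post) pre.length (pre.length + seg.length - 1) =
        pre ++ seg' ++ post := by
  intro fuel
  induction fuel with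
  | zero =>
    intro seg pre post hf
    have : seg = [] := List.length_eq_zero_iff.mp (by omega)
    subst this
    exact ⟨[], by simp, by simp, by simp [pvQsortHelper]⟩
  | succ fuel ih =>
    intro seg pre post hf
    by_cases hsmall : seg.length < 2
    · refine ⟨seg, List.Perm.refl _, ?_, ?_⟩
      · match seg, hsmall with
        | [], _ => simp
        | [x], _ => simp
      · simp only [pvQsortHelper]
        rw [if_neg (by omega)]
    · obtain ⟨U, piv, hseg⟩ : ∃ U piv, seg = U ++ [piv] := by
        rcases List.eq_nil_or_concat seg with h | ⟨U, piv, h⟩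
        · exact absurd h (by intro h; rw [h] at hsmall; simp at hsmall)
        · exact ⟨U, piv, by simpa using h⟩
      subst hseg
      have hU : 1 ≤ U.length := by
        have h2 := hsmall
        simp only [List.length_append, List.length_cons, List.length_nil] at h2
        omega
      have hflen : U.length + 1 ≤ fuel + 1 := by simpa using hf
      simp only [pvQsortHelper]
      rw [if_pos (by simp only [List.length_append, List.length_cons, List.length_nil]; omega)]
      rw [show pre.length + (U ++ [piv]).length - 1 = pre.length + U.length from by simp]
      obtain ⟨L, R, hL, hR, hperm, heq⟩ := pvPartition_spec pre U post piv
      have hLR : L.length + R.length = U.length := by simpa using hperm.length_eq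
      have e1 : (pvPartition (pre ++ (U ++ [piv]) ++ post) pre.length (pre.length + U.length)).1
          = pre ++ (L ++ [piv] ++ R) ++ post := by rw [heq]
      have e2 : (pvPartition (pre ++ (U ++ [piv]) ++ post) pre.length (pre.length + U.length)).2
          = pre.length + L.length := by rw [heq]
      rw [e1, e2]
      -- first recursive call sorts L
      obtain ⟨L', pL, wL, qL⟩ := ih L pre ([piv] ++ R ++ post) (by omega)
      have hL'len : L'.length = L.length := pL.length_eq
      rw [show pre ++ (L ++ [piv] ++ R) ++ post = pre ++ L ++ ([piv] ++ R ++ post) from by simp,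
          show pre.length + L.length - 1 = pre.length + L.length - 1 from rfl]
      rw [qL]
      -- second recursive call sorts R
      obtain ⟨R', pR, wR, qR⟩ := ih R (pre ++ L' ++ [piv]) post (by omega)
      have hR'len : R'.length = R.length := pR.length_eq
      rw [show pre ++ L' ++ ([piv] ++ R ++ post) = (pre ++ L' ++ [piv]) ++ R ++ post from by simp]
      rw [show pre.length + L.length + 1 = (pre ++ L' ++ [piv]).length from by simp [hL'len] <;> omega]
      rw [show pre.length + U.length = (pre ++ L' ++ [piv]).length + R.length - 1 from by
            simp [hL'len] <;> omega]
      rw [qR]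
      refine ⟨L' ++ [piv] ++ R', ?_, ?_, by simp⟩
      · have p1 : (L' ++ [piv] ++ R').Perm (L ++ [piv] ++ R) :=
          (pL.append (List.Perm.refl [piv])).append pR
        have p2 : (L ++ [piv] ++ R).Perm (L ++ R ++ [piv]) := by
          refine pvPermAux _ _ ?_
          simp only [← Multiset.coe_add, ← Multiset.cons_coe]
          simp only [← Multiset.singleton_add]
          abel
        exact (p1.trans p2).trans (hperm.append (List.Perm.refl [piv]))
      · rw [show L' ++ [piv] ++ R' = L' ++ piv :: R' from by simp]
        rw [List.pairwise_append]
        refine ⟨wL, ?_, ?_⟩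
        · rw [List.pairwise_cons]
          constructor
          · intro y hy
            have : ¬ y > piv := hR y (pR.mem_iff.mp hy)
            omega
          · exact wR
        · intro x hx y hy
          have hxg : x > piv := hL x (pL.mem_iff.mp hx)
          rcases List.mem_cons.mp hy with h | h
          · omega
          · have : ¬ y > piv := hR y (pR.mem_iff.mp h)
            omega

theorem pvDescUnique (l1 l2 : List Int) (hp : l1.Perm l2)
    (h1 : l1.Pairwise (· ≥ ·)) (h2 : l2.Pairwise (· ≥ ·)) : l1 = l2 :=
  List.Perm.eq_of_pairwise (fun _ _ _ _ hab hba => le_antisymm hba hab) h1 h2 hp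

-- ===== VERDICT (by name: the statement is the Claim_ definition above) =====
theorem rearrange_digits_quick_sort_spec : Claim_equal_rearrange_digits_quick_sort := by
  unfold Claim_equal_rearrange_digits_quick_sort Spec_rearrange_digits_quick_sort
  intro l _
  simp only [rearrange_digits_quick_sort, rearrange_digits_quick_sort_alt]
  by_cases hnil : l.length = 0
  · have h := List.length_eq_zero_iff.mp hnil
    subst h
    rfl
  · rw [if_neg hnil]
    obtain ⟨s', hperm, hpair, heq⟩ := pvQsort_spec l.length l [] [] (le_refl _)
    simp only [List.append_nil, List.nil_append, List.length_nil, Nat.zero_add] at heq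
    rw [heq]
    have hs2 : PySem.List.sorted l (fun x => x) true = s' := by
      refine pvDescUnique _ _ ?_ ?_ hpair
      · exact (PySem.List.sorted_perm l (fun x => x) true).trans hperm.symm
      · exact (PySem.List.sorted_pairwise_rev l (fun x => x)).imp (fun h => h)
    rw [hs2]
    rw [pvSplitLoop_eq s']
    rw [pvPairGo_eq s' 0 0]
    rw [pvPowLoop_eq, pvPowLoop_eq]
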